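-- pv_equiv track=rewrite | github.com/osatetsu/TekkenCommandImaging | tekken_command_image.py | move_symbol
-- ===== SOURCE A (Python) =====
-- def move_symbol(symbol, x):
--     '''
--     '''
--     result = []
--     is_x = True
--     for p in symbol:
--         if is_x:
--             result.append(p + x)
--         else:
--             result.append(p)
--         is_x = not is_x
--
--     return tuple(result)
-- ===== SOURCE B (Python) =====
-- def move_symbol(symbol, x):
--     r = list(symbol)
--     r[::2] = [p + x for p in r[::2]]
--     return tuple(r)
-- ===== Notes on version B (the rewrite author's own statement) =====
-- stated objective: idiomatic
-- what changed: B replaces the boolean-toggle accumulation loop by extended slice assignment: it extracts the even-index subsequence, adds x to it in one comprehension, and splices it back with r[::2] = ...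
import Mathlib
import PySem

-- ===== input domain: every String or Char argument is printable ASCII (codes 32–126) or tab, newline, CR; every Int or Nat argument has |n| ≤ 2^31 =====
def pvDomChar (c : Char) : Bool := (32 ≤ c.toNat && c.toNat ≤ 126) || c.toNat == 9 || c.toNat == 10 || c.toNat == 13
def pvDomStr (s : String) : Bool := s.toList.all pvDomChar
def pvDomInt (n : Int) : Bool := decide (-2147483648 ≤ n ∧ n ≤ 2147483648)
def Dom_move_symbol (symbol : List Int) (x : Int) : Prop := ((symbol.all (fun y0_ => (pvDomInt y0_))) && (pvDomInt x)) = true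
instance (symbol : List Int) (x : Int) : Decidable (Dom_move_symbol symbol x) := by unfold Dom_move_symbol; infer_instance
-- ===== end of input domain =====

-- B replaces A's boolean-toggle loop by slice extraction/assignment: take the even-index
-- subsequence, add x to it, splice it back (objective: idiomatic; return value only,
-- both programs leave their argument unchanged).

-- ===== PORT A =====
-- A: result = []; is_x = True; for p in symbol: append (p+x) or p, toggling is_x.
def move_symbol (symbol : List Int) (x : Int) : List Int :=
  (symbol.foldl
    (fun (st : List Int × Bool) p =>
      (if st.2 then st.1 ++ [p + x] else st.1 ++ [p], !st.2))
    ([], true)).1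

-- ===== PORT B =====
-- Hand port of Python's extended slice ASSIGNMENT `r[::2] = vs`: write the values vs onto
-- positions 0,2,4,… of r.  Exact whenever vs has exactly as many elements as r has even
-- positions (Python raises a ValueError otherwise; B always calls it with matching length).
def pySetStep2 (vs : List Int) (r : List Int) : List Int :=
  match vs, r with
  | _, [] => []
  | [], r => r
  | v :: _, [_] => [v]
  | v :: vs, _ :: b :: rest => v :: b :: pySetStep2 vs rest

-- B: r = list(symbol); r[::2] = [p + x for p in r[::2]]; return tuple(r)
def move_symbol_alt (symbol : List Int) (x : Int) : List Int :=
  let evens := (PySem.List.slice? symbol none none 2).getD []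
  pySetStep2 (evens.map (fun p => p + x)) symbol

-- ===== PRECONDITION & SPEC =====
def Spec_move_symbol (symbol : List Int) (x : Int) (out : List Int) : Prop := out = move_symbol_alt symbol x
instance (symbol : List Int) (x : Int) (out : List Int) : Decidable (Spec_move_symbol symbol x out) := by unfold Spec_move_symbol; infer_instance

-- ===== CLAIM (what is proved, stated in full; the proofs are below) =====
def Claim_equal_move_symbol : Prop := ∀ (symbol : List Int) (x : Int), Dom_move_symbol symbol x → Spec_move_symbol symbol x (move_symbol symbol x)

-- ===== LEMMAS AND PROOFS =====

-- every element at an even index, i.e. Python's symbol[::2]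
def everyOther : List Int → List Int
  | [] => []
  | [a] => [a]
  | a :: _ :: rest => a :: everyOther rest

-- A's loop with explicit toggle state
def tog (x : Int) : List Int → Bool → List Int
  | [], _ => []
  | p :: ps, b => (if b then p + x else p) :: tog x ps (!b)

theorem foldl_eq_tog (x : Int) :
    ∀ (xs : List Int) (acc : List Int) (b : Bool),
      (xs.foldl
        (fun (st : List Int × Bool) p =>
          (if st.2 then st.1 ++ [p + x] else st.1 ++ [p], !st.2))
        (acc, b)).1 = acc ++ tog x xs b := by
  intro xs
  induction xs with
  | nil => intro acc b; simp [tog]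
  | cons p ps ih =>
    intro acc b
    cases b <;> simp [List.foldl, tog, ih]

theorem everyOther_eq : ∀ xs : List Int,
    (List.range ((xs.length + 1) / 2)).filterMap (fun k => xs[2 * k]?) = everyOther xs := by
  intro xs
  induction xs using everyOther.induct with
  | case1 => simp [everyOther]
  | case2 a => norm_num [everyOther, List.range_succ, List.filterMap_cons]
  | case3 a b rest ih =>
    have hct : ((a :: b :: rest).length + 1) / 2 = (rest.length + 1) / 2 + 1 := by
      simp only [List.length_cons]; omega
    have hsh : ∀ k : Nat, (a :: b :: rest)[2 * Nat.succ k]? = rest[2 * k]? := by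
      intro k
      have h2 : 2 * Nat.succ k = (2 * k) + 2 := by omega
      simp [h2]
    rw [hct, List.range_succ_eq_map]
    simp [List.filterMap_cons, List.filterMap_map, Function.comp_def, hsh, ih, everyOther]

theorem slice?_step2 (xs : List Int) :
    PySem.List.slice? xs none none 2 = some (everyOther xs) := by
  unfold PySem.List.slice? PySem.List.sliceIndices
  norm_num
  convert everyOther_eq xs using 2
  congr 1
  split_ifs with h <;> omega

theorem splice_eq_tog (x : Int) :
    ∀ (xs : List Int),
      pySetStep2 ((everyOther xs).map (fun p => p + x)) xs = tog x xs true := by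
  intro xs
  induction xs using everyOther.induct with
  | case1 => simp [everyOther, pySetStep2, tog]
  | case2 a => simp [everyOther, pySetStep2, tog]
  | case3 a b rest ih => simp [everyOther, pySetStep2, tog, ih]

-- ===== VERDICT (by name: the statement is the Claim_ definition above) =====
theorem move_symbol_spec : Claim_equal_move_symbol := by
  intro symbol x _
  unfold Spec_move_symbol move_symbol move_symbol_alt
  rw [slice?_step2]
  simpa [foldl_eq_tog x symbol [] true] using (splice_eq_tog x symbol).symm
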